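-- pv_equiv track=rewrite | github.com/m4sango/atcoder | 2022/11/05/abc276d.py | pattern_2_or_3
-- ===== SOURCE A (Python) =====
-- def pattern_2_or_3(x, r: list):
--     if x % 2 != 0 and x % 3 != 0:
--         return r
--     if x % 2 == 0:
--         r.append(x // 2)
--         return pattern_2_or_3(x // 2, r)
--
--     if x % 3 == 0:
--         r.append(x // 3)
--         return pattern_2_or_3(x // 3, r)
-- ===== SOURCE B (Python) =====
-- def pattern_2_or_3(x, r: list):
--     # Two phases: strip all factors of 2 first, then all factors of 3.
--     # Equivalent to A because once x is odd, x // 3 stays odd, so the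
--     # 2-branch can never fire again. r is mutated in place, as in A.
--     while x % 2 == 0:
--         x //= 2
--         r.append(x)
--     while x % 3 == 0:
--         x //= 3
--         r.append(x)
--     return r
-- ===== Notes on version B (the rewrite author's own statement) =====
-- stated objective: simpler
-- what changed: Replaces the mixed tail-recursion (re-testing both divisibilities each step) by two sequential while-loops: first divide out every factor of 2, then every factor of 3 (valid since an odd number divided by 3 stays odd); both mutate r in place.
import Mathlib
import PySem

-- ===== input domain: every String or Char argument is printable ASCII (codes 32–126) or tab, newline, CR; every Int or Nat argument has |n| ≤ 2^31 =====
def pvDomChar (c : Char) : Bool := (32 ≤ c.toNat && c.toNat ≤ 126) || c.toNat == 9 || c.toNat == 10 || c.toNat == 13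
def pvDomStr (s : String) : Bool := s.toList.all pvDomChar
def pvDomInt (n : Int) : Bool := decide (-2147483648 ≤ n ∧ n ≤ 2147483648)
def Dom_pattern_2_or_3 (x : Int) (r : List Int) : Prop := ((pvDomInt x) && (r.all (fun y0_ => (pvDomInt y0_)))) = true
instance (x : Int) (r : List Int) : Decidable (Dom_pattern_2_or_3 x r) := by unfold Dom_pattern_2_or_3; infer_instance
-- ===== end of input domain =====

-- B replaces A's mixed tail-recursion by two sequential divide-out loops (2s, then 3s);
-- both Pythons mutate r in place, the equivalence proved is about the returned list's value.

-- exact division by 2 (resp. 3) strictly shrinks |x| when x ≠ 0 (termination of both ports)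
theorem pv_half_lt (x : Int) (hx : x ≠ 0) (h : PySem.Int.mod x 2 = 0) :
    (PySem.Int.floordiv x 2).natAbs < x.natAbs := by
  rw [PySem.Int.floordiv_eq_ediv_of_pos (by omega)]
  rw [PySem.Int.mod_eq_emod_of_pos (by omega)] at h
  omega

theorem pv_third_lt (x : Int) (hx : x ≠ 0) (h : PySem.Int.mod x 3 = 0) :
    (PySem.Int.floordiv x 3).natAbs < x.natAbs := by
  rw [PySem.Int.floordiv_eq_ediv_of_pos (by omega)]
  rw [PySem.Int.mod_eq_emod_of_pos (by omega)] at h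
  omega

-- ===== PORT A =====
-- literal port of A's tail recursion; the 'x = 0' test is only a totality guard
-- (at x = 0 the Python recurses forever — excluded by Pre_ below)
def pattern_2_or_3 (x : Int) (r : List Int) : List Int :=
  if x = 0 then r
  else if PySem.Int.mod x 2 ≠ 0 ∧ PySem.Int.mod x 3 ≠ 0 then r
  else if h2 : PySem.Int.mod x 2 = 0 then
    pattern_2_or_3 (PySem.Int.floordiv x 2) (r ++ [PySem.Int.floordiv x 2])
  else if h3 : PySem.Int.mod x 3 = 0 then
    pattern_2_or_3 (PySem.Int.floordiv x 3) (r ++ [PySem.Int.floordiv x 3])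
  else r
termination_by x.natAbs
decreasing_by
  · exact pv_half_lt x (by assumption) h2
  · exact pv_third_lt x (by assumption) h3

-- ===== PORT B =====
-- first while-loop of Source B: divide out factors of 2 ('x = 0' test = totality guard)
def pvDiv2Loop (x : Int) (r : List Int) : Int × List Int :=
  if x = 0 then (x, r)
  else if h2 : PySem.Int.mod x 2 = 0 then
    pvDiv2Loop (PySem.Int.floordiv x 2) (r ++ [PySem.Int.floordiv x 2])
  else (x, r)
termination_by x.natAbs
decreasing_by exact pv_half_lt x (by assumption) h2

-- second while-loop of Source B: divide out factors of 3
def pvDiv3Loop (x : Int) (r : List Int) : Int × List Int :=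
  if x = 0 then (x, r)
  else if h3 : PySem.Int.mod x 3 = 0 then
    pvDiv3Loop (PySem.Int.floordiv x 3) (r ++ [PySem.Int.floordiv x 3])
  else (x, r)
termination_by x.natAbs
decreasing_by exact pv_third_lt x (by assumption) h3

def pattern_2_or_3_alt (x : Int) (r : List Int) : List Int :=
  let p := pvDiv2Loop x r
  (pvDiv3Loop p.1 p.2).2

-- ===== PRECONDITION & SPEC =====
-- Pre_ excludes only x = 0, on which the Python A recurses forever (RecursionError)
def Pre_pattern_2_or_3 (x : Int) (r : List Int) : Prop := x ≠ 0
instance (x : Int) (r : List Int) : Decidable (Pre_pattern_2_or_3 x r) := by unfold Pre_pattern_2_or_3; infer_instance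
def pvWitness_pattern_2_or_3 : Int × List Int := (12, [5])

def Spec_pattern_2_or_3 (x : Int) (r : List Int) (out : List Int) : Prop := out = pattern_2_or_3_alt x r
instance (x : Int) (r : List Int) (out : List Int) : Decidable (Spec_pattern_2_or_3 x r out) := by unfold Spec_pattern_2_or_3; infer_instance

-- ===== CLAIM (what is proved, stated in full; the proofs are below) =====
def Claim_equal_pattern_2_or_3 : Prop := ∀ (x : Int) (r : List Int), Dom_pattern_2_or_3 x r → Pre_pattern_2_or_3 x r → Spec_pattern_2_or_3 x r (pattern_2_or_3 x r)

-- ===== LEMMAS AND PROOFS =====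

-- an odd multiple of 3 divided by 3 is still odd
theorem pv_odd_div3_odd (x : Int) (h2 : PySem.Int.mod x 2 ≠ 0) (h3 : PySem.Int.mod x 3 = 0) :
    PySem.Int.mod (PySem.Int.floordiv x 3) 2 ≠ 0 := by
  rw [PySem.Int.floordiv_eq_ediv_of_pos (by omega), PySem.Int.mod_eq_emod_of_pos (by omega)]
  rw [PySem.Int.mod_eq_emod_of_pos (by omega)] at h2
  rw [PySem.Int.mod_eq_emod_of_pos (by omega)] at h3
  omega

theorem pv_odd_ne_zero (x : Int) (h2 : PySem.Int.mod x 2 ≠ 0) : x ≠ 0 := by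
  intro h; apply h2; subst h; rfl

-- on odd x, A coincides with B's second loop
theorem pv_A_eq_loop3 (x : Int) (r : List Int) (h2 : PySem.Int.mod x 2 ≠ 0) :
    pattern_2_or_3 x r = (pvDiv3Loop x r).2 := by
  have key : ∀ n : Nat, ∀ x : Int, ∀ r : List Int, x.natAbs = n →
      PySem.Int.mod x 2 ≠ 0 → pattern_2_or_3 x r = (pvDiv3Loop x r).2 := by
    intro n
    induction n using Nat.strong_induction_on with
    | _ n ih =>
      intro x r hn h2
      have hx : x ≠ 0 := pv_odd_ne_zero x h2
      have d2 : ¬ (2 : Int) ∣ x := fun h => h2 ((PySem.Int.mod_eq_zero_iff_dvd x 2).mpr h)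
      have e2 : x % 2 = 1 := by omega
      rw [pattern_2_or_3, pvDiv3Loop]
      by_cases h3 : PySem.Int.mod x 3 = 0
      · have d3 : (3 : Int) ∣ x := (PySem.Int.mod_eq_zero_iff_dvd x 3).mp h3
        have hf3 : PySem.Int.floordiv x 3 = x / 3 := PySem.Int.floordiv_eq_ediv_of_pos (by omega)
        have hrec := ih (x / 3).natAbs (by rw [← hf3]; exact hn ▸ pv_third_lt x hx h3)
          (x / 3) (r ++ [x / 3]) rfl (by rw [← hf3]; exact pv_odd_div3_odd x h2 h3)
        simp [hx, d2, d3, e2, hrec]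
      · have d3 : ¬ (3 : Int) ∣ x := fun h => h3 ((PySem.Int.mod_eq_zero_iff_dvd x 3).mpr h)
        simp [hx, d2, d3, e2]
  exact key x.natAbs x r rfl h2

-- A equals B everywhere except x = 0
theorem pv_main (x : Int) (r : List Int) (hx : x ≠ 0) :
    pattern_2_or_3 x r = pattern_2_or_3_alt x r := by
  have key : ∀ n : Nat, ∀ x : Int, ∀ r : List Int, x.natAbs = n → x ≠ 0 →
      pattern_2_or_3 x r = pattern_2_or_3_alt x r := by
    intro n
    induction n using Nat.strong_induction_on with
    | _ n ih =>
      intro x r hn hx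
      by_cases h2 : PySem.Int.mod x 2 = 0
      · have d2 : (2 : Int) ∣ x := (PySem.Int.mod_eq_zero_iff_dvd x 2).mp h2
        have hf2 : PySem.Int.floordiv x 2 = x / 2 := PySem.Int.floordiv_eq_ediv_of_pos (by omega)
        have hq : x / 2 ≠ 0 := by omega
        have hrec := ih (x / 2).natAbs (by rw [← hf2]; exact hn ▸ pv_half_lt x hx h2)
          (x / 2) (r ++ [x / 2]) rfl hq
        have hA : pattern_2_or_3 x r = pattern_2_or_3 (x / 2) (r ++ [x / 2]) := by
          rw [pattern_2_or_3]; simp [hx, d2]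
        have hB : pattern_2_or_3_alt x r = pattern_2_or_3_alt (x / 2) (r ++ [x / 2]) := by
          unfold pattern_2_or_3_alt
          rw [pvDiv2Loop]; simp [hx, d2]
        rw [hA, hB, hrec]
      · have d2 : ¬ (2 : Int) ∣ x := fun h => h2 ((PySem.Int.mod_eq_zero_iff_dvd x 2).mpr h)
        have hB : pattern_2_or_3_alt x r = (pvDiv3Loop x r).2 := by
          unfold pattern_2_or_3_alt
          rw [pvDiv2Loop]; simp [hx, d2]
        rw [hB]
        exact pv_A_eq_loop3 x r h2
  exact key x.natAbs x r rfl hx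

-- ===== VERDICT (by name: the statement is the Claim_ definition above) =====
theorem pattern_2_or_3_spec : Claim_equal_pattern_2_or_3 := by
  intro x r _ hx
  unfold Spec_pattern_2_or_3
  exact pv_main x r hx
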